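-- pv_equiv track=rewrite | github.com/gabriellaec/desoft-analise-exercicios | backup/user_307/ch51_2019_04_04_17_31_36_437731.py | estritamente_crescente
-- ===== SOURCE A (Python) =====
-- def estritamente_crescente(lista):
-- 	new=[]
-- 	i=1
-- 	new.append(lista[0])
-- 	while i<len(lista):
-- 		if lista[i]>new[len(new)-1]:
-- 			new.append(lista[i])
-- 		i+=1
-- 	return new
-- ===== SOURCE B (Python) =====
-- def estritamente_crescente(lista):
--     # Two passes: build a prefix-maximum table, then keep each later element beating the prefix max before it.
--     prefmax = []
--     m = lista[0]
--     for x in lista: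
--         if x > m:
--             m = x
--         prefmax.append(m)
--     return [lista[0]] + [x for p, x in zip(prefmax, lista[1:]) if x > p]
-- ===== Notes on version B (the rewrite author's own statement) =====
-- stated objective: alternative
-- what changed: Replaces the single growing loop that re-reads the last kept element with a two-pass decomposition: a precomputed prefix-maximum table, then a zip/comprehension that keeps each element exceeding the prefix max before it.
import Mathlib
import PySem

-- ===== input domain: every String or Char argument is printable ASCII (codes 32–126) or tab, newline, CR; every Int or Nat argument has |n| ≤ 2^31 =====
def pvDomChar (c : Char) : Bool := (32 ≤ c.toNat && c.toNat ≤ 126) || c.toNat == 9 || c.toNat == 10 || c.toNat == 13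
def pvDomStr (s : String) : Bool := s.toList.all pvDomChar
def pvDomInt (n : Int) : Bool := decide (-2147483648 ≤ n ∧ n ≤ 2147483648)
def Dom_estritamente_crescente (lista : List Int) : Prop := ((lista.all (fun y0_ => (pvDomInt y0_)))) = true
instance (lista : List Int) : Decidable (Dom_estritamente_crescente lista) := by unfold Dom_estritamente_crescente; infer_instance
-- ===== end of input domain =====

-- B replaces A's single growing loop reading new[-1] reading new[-1] with a prefix-maximum table plus a second filtering pass (same cost, different decomposition).

-- ===== PORT A =====
-- A's while loop over index i, carrying the growing list `new` (always nonempty).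
def pvLoopA (lista : List Int) (new : List Int) (i : Nat) : List Int :=
  if h : i < lista.length then
    pvLoopA lista (if lista[i] > new.getLast! then new ++ [lista[i]] else new) (i + 1)
  else new
termination_by lista.length - i

def estritamente_crescente (lista : List Int) : List Int :=
  match PySem.List.pyGet? lista 0 with
  | none => []   -- indexing the first element raises IndexError on the empty list; excluded by Pre_
  | some x0 => pvLoopA lista [x0] 1

-- ===== PORT B =====
def estritamente_crescente_alt (lista : List Int) : List Int :=
  match lista with
  | [] => []   -- Source B also indexes the first element, raising IndexError on the empty list; excluded by Pre_
  | x0 :: _ =>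
    let prefmax := (lista.foldl (fun (s : Int × List Int) x =>
        let m := if x > s.1 then x else s.1
        (m, s.2 ++ [m])) (x0, [])).2
    x0 :: ((prefmax.zip (lista.drop 1)).filter (fun p => p.2 > p.1)).map (fun p => p.2)

-- ===== PRECONDITION & SPEC =====
-- A indexes the first element unconditionally, so it raises IndexError exactly on the empty list.
def Pre_estritamente_crescente (lista : List Int) : Prop := lista ≠ []
instance (lista : List Int) : Decidable (Pre_estritamente_crescente lista) := by unfold Pre_estritamente_crescente; infer_instance
def pvWitness_estritamente_crescente : List Int := [3, 1, 4, 4, 5]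

def Spec_estritamente_crescente (lista : List Int) (out : List Int) : Prop := out = estritamente_crescente_alt lista
instance (lista : List Int) (out : List Int) : Decidable (Spec_estritamente_crescente lista out) := by unfold Spec_estritamente_crescente; infer_instance

-- ===== CLAIM (what is proved, stated in full; the proofs are below) =====
def Claim_equal_estritamente_crescente : Prop := ∀ (lista : List Int), Dom_estritamente_crescente lista → Pre_estritamente_crescente lista → Spec_estritamente_crescente lista (estritamente_crescente lista)

-- ===== LEMMAS AND PROOFS =====

-- Common reference: the kept tail elements, given the running max m.
def pvKeep : List Int → Int → List Int
  | [], _ => []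
  | v :: rest, m => if v > m then v :: pvKeep rest v else pvKeep rest m

-- Prefix-maximum list starting from max m.
def pvPM : Int → List Int → List Int
  | _, [] => []
  | m, x :: xs => (if x > m then x else m) :: pvPM (if x > m then x else m) xs

theorem pvGetLast!_concat (l : List Int) (v : Int) : (l ++ [v]).getLast! = v := by
  induction l with
  | nil => rfl
  | cons a l ih => cases l <;> simp_all [List.getLast!]

-- A's loop body as structural recursion on the remaining suffix.
theorem pvLoopA_drop (lista : List Int) : ∀ (i : Nat) (new : List Int), new ≠ [] →
    pvLoopA lista new i = new ++ pvKeep (lista.drop i) new.getLast! := by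
  intro i
  induction' hk : lista.length - i using Nat.strong_induction_on with k ih generalizing i
  intro new hne
  rw [pvLoopA]
  by_cases h : i < lista.length
  · simp only [h, dif_pos]
    rw [List.drop_eq_getElem_cons h]
    by_cases hv : lista[i] > new.getLast!
    · simp only [hv, if_pos, pvKeep]
      rw [ih (lista.length - (i+1)) (by omega) (i+1) rfl (new ++ [lista[i]]) (by simp),
          pvGetLast!_concat]
      simp
    · simp only [hv, pvKeep]
      exact ih (lista.length - (i+1)) (by omega) (i+1) rfl new hne
  · simp only [h, dif_neg, not_false_iff]
    rw [List.drop_eq_nil_of_le (by omega)]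
    simp [pvKeep]

-- B's foldl builds exactly acc ++ pvPM m xs (running max pvLastMax m xs).
def pvLastMax : Int → List Int → Int
  | m, [] => m
  | m, x :: xs => pvLastMax (if x > m then x else m) xs

theorem pvFoldl_pm (xs : List Int) : ∀ (m : Int) (acc : List Int),
    (xs.foldl (fun (s : Int × List Int) x =>
        let m := if x > s.1 then x else s.1
        (m, s.2 ++ [m])) (m, acc)) =
      (pvLastMax m xs, acc ++ pvPM m xs) := by
  induction xs with
  | nil => simp [pvPM, pvLastMax]
  | cons x xs ih =>
    intro m acc
    by_cases h : x > m <;> simp [pvPM, pvLastMax, h, ih]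

-- Filtering the zip of the prefix-max table against the tail gives pvKeep.
theorem pvZip_filter (xs : List Int) : ∀ (m : Int),
    ((List.zip (m :: pvPM m xs) xs).filter (fun p => p.2 > p.1)).map (fun p => p.2)
      = pvKeep xs m := by
  induction xs with
  | nil => simp [pvKeep]
  | cons v rest ih =>
    intro m
    by_cases h : v > m <;>
      simp [pvPM, pvKeep, h, ih]

-- ===== VERDICT (by name: the statement is the Claim_ definition above) =====
theorem estritamente_crescente_spec : Claim_equal_estritamente_crescente := by
  intro lista _ hpre
  unfold Spec_estritamente_crescente
  match lista with
  | [] => exact absurd rfl hpre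
  | x0 :: rest =>
    rw [show estritamente_crescente (x0 :: rest) = pvLoopA (x0 :: rest) [x0] 1 from by
      unfold estritamente_crescente; rw [PySem.List.pyGet?_zero_cons]]
    rw [pvLoopA_drop (x0 :: rest) 1 [x0] (by simp)]
    have hpm : pvPM x0 (x0 :: rest) = x0 :: pvPM x0 rest := by simp [pvPM]
    show _ = estritamente_crescente_alt (x0 :: rest)
    simp only [estritamente_crescente_alt, pvFoldl_pm]
    simp only [hpm, List.drop_one, List.tail_cons, List.nil_append]
    rw [pvZip_filter rest x0]
    simp [List.getLast!]
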